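-- pv_equiv track=rewrite | github.com/Ayan44/Trolley-AI | backend/ai_model.py | aggregate_track_for_ml
-- ===== SOURCE A (Python) =====
-- def aggregate_track_for_ml(track: list) -> dict:
--     """
--     Yeni data modelindəki track-i (şəxslər listi) ML modelinin başa düşdüyü
--     sadə formata çevirir:
--     {
--         "children": X,
--         "adults": Y,
--         "elders": Z
--     }
--
--     Burada:
--     - age == "child"  → children
--     - age == "teen" / "young" / "adult" → adults
--     - age == "elder" → elders
--     Digər age dəyərləri üçün ehtiyatla adults kimi saya bilərik.
--     """
--     children = 0
--     adults = 0
--     elders = 0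
--
--     for person in track:
--         age = person.get("age")
--         if age == "child":
--             children += 1
--         elif age in ("teen", "young", "adult", None):
--             adults += 1
--         elif age == "elder":
--             elders += 1
--         else:
--             # Naməlum age üçün default olaraq böyüklərə əlavə edirik
--             adults += 1
--
--     return {
--         "children": children,
--         "adults": adults,
--         "elders": elders
--     }
-- ===== SOURCE B (Python) =====
-- def aggregate_track_for_ml(track: list) -> dict:
--     ages = [person.get("age") for person in track]
--     children = ages.count("child")
--     elders = ages.count("elder")
--     return {
--         "children": children,
--         "adults": len(track) - children - elders,
--         "elders": elders
--     }
-- ===== Notes on version B (the rewrite author's own statement) =====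
-- stated objective: simpler
-- what changed: Replaces the four-branch per-person classification loop with two counts over the extracted age list (children and elders) and derives adults arithmetically as len(track) - children - elders, since adults is the catch-all bucket.
import Mathlib
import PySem

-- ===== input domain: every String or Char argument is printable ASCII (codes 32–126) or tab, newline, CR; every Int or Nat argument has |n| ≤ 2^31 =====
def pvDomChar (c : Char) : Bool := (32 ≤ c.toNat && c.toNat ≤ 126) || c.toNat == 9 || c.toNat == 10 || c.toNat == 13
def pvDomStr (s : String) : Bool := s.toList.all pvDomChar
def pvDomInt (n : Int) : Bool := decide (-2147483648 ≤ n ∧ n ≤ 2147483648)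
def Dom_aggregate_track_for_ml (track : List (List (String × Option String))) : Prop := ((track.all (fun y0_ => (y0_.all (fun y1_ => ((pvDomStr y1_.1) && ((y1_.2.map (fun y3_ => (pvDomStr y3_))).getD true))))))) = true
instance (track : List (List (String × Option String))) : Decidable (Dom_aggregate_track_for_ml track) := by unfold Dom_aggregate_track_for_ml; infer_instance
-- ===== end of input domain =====

-- B replaces A's four-branch classification loop by counting the two definite
-- categories (children, elders) and computing adults = len - children - elders (objective: simpler).


-- person.get("age"): first match in the association list, None if absent
def pvGetAge (person : List (String × Option String)) : Option String :=
  match person.find? (fun kv => kv.1 == "age") with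
  | some kv => kv.2
  | none => none

-- ===== PORT A =====
-- one loop iteration of A: the if/elif chain updating (children, adults, elders)
def pvAggStep (st : Int × Int × Int) (person : List (String × Option String)) : Int × Int × Int :=
  let age := pvGetAge person
  if age == some "child" then (st.1 + 1, st.2.1, st.2.2)
  else if age == some "teen" || age == some "young" || age == some "adult" || age == none then
    (st.1, st.2.1 + 1, st.2.2)
  else if age == some "elder" then (st.1, st.2.1, st.2.2 + 1)
  else (st.1, st.2.1 + 1, st.2.2)

def aggregate_track_for_ml (track : List (List (String × Option String))) : List (String × Int) :=
  let st := track.foldl pvAggStep (0, 0, 0)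
  [("children", st.1), ("adults", st.2.1), ("elders", st.2.2)]

-- ===== PORT B =====
def aggregate_track_for_ml_alt (track : List (List (String × Option String))) : List (String × Int) :=
  let ages := track.map pvGetAge
  let children : Int := ages.count (some "child")
  let elders : Int := ages.count (some "elder")
  [("children", children), ("adults", (track.length : Int) - children - elders), ("elders", elders)]

-- ===== PRECONDITION & SPEC =====
def Spec_aggregate_track_for_ml (track : List (List (String × Option String))) (out : List (String × Int)) : Prop := out = aggregate_track_for_ml_alt track
instance (track : List (List (String × Option String))) (out : List (String × Int)) : Decidable (Spec_aggregate_track_for_ml track out) := by unfold Spec_aggregate_track_for_ml; infer_instance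

-- ===== CLAIM (what is proved, stated in full; the proofs are below) =====
def Claim_equal_aggregate_track_for_ml : Prop := ∀ (track : List (List (String × Option String))), Dom_aggregate_track_for_ml track → Spec_aggregate_track_for_ml track (aggregate_track_for_ml track)

-- ===== LEMMAS AND PROOFS =====
theorem pvAgg_loop (l : List (List (String × Option String))) (c a e : Int) :
    l.foldl pvAggStep (c, a, e) =
      (c + ((l.map pvGetAge).count (some "child") : Int),
       a + ((l.length : Int) - ((l.map pvGetAge).count (some "child") : Int)
             - ((l.map pvGetAge).count (some "elder") : Int)),
       e + ((l.map pvGetAge).count (some "elder") : Int)) := by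
  induction l generalizing c a e with
  | nil => simp
  | cons hd tl ih =>
    simp only [List.foldl_cons, List.map_cons, List.count_cons, List.length_cons, pvAggStep]
    by_cases h1 : pvGetAge hd = some "child"
    · simp [h1, ih]
      ring
    · by_cases h2 : pvGetAge hd = some "teen" ∨ pvGetAge hd = some "young" ∨
          pvGetAge hd = some "adult" ∨ pvGetAge hd = none
      · have hne : pvGetAge hd ≠ some "elder" := by
          rcases h2 with h | h | h | h <;> simp [h]
        have hch : ((pvGetAge hd == some "child") : Bool) = false := by
          simp [h1]
        have hmem : ((pvGetAge hd == some "teen") || (pvGetAge hd == some "young") ||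
            (pvGetAge hd == some "adult") || (pvGetAge hd == none)) = true := by
          rcases h2 with h | h | h | h <;> simp [h]
        simp [hch, ih, hne]
        ring
      · rw [not_or, not_or, not_or] at h2
        obtain ⟨ht, hy, ha, hn⟩ := h2
        have hch : ((pvGetAge hd == some "child") : Bool) = false := by simp [h1]
        have hmem : ((pvGetAge hd == some "teen") || (pvGetAge hd == some "young") ||
            (pvGetAge hd == some "adult") || (pvGetAge hd == none)) = false := by
          simp [ht, hy, ha, Option.isSome_iff_ne_none, hn]
        by_cases h3 : pvGetAge hd = some "elder"
        · simp [h3, ih]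
          omega
        · simp [hch, h3, ih]
          ring

-- ===== VERDICT (by name: the statement is the Claim_ definition above) =====
theorem aggregate_track_for_ml_spec : Claim_equal_aggregate_track_for_ml := by
  intro track _
  unfold Spec_aggregate_track_for_ml aggregate_track_for_ml aggregate_track_for_ml_alt
  rw [pvAgg_loop]
  simp
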